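-- pv_equiv track=rewrite | github.com/themaigod/WSI-with-Gaze-Processing | InitDataset/InitDataset.py | produce_add_list
-- ===== SOURCE A (Python) =====
-- def produce_add_list(list_a):
--     add_list = []
--     for i in range(len(list_a)):
--         if i == 0:
--             add_list.append(len(list_a))
--         else:
--             add_list.append(len(list_a) + add_list[i - 1])
--     return add_list
-- ===== SOURCE B (Python) =====
-- def produce_add_list(list_a):
--     n = len(list_a)
--     return [(i + 1) * n for i in range(n)]
-- ===== Notes on version B (the rewrite author's own statement) =====
-- stated objective: simpler
-- what changed: Replaces the running-sum accumulator (each element = len + previous element, read back via add_list[i-1]) with the independent closed form (i+1)*len per index.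
import Mathlib
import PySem

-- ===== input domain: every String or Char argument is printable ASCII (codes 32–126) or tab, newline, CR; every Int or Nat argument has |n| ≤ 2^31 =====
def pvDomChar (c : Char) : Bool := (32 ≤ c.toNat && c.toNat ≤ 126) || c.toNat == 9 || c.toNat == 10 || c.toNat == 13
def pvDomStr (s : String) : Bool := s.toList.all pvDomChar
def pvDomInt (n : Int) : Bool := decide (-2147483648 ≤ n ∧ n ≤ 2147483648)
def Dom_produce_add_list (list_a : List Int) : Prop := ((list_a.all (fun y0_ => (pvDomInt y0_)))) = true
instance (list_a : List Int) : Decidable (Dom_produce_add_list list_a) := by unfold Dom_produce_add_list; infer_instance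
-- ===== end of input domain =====

-- B replaces A's running-sum accumulator with the closed form (i+1)*len per index (simpler).


-- ===== PORT A =====
def produce_add_list (list_a : List Int) : List Int :=
  (PySem.List.pyRange 0 list_a.length 1).foldl
    (fun add_list i =>
      if i == 0 then add_list ++ [(list_a.length : Int)]
      else add_list ++ [(list_a.length : Int) + PySem.List.pyGetD add_list (i - 1) 0]) []

-- ===== PORT B =====
def produce_add_list_alt (list_a : List Int) : List Int :=
  let n : Int := list_a.length
  (PySem.List.pyRange 0 n 1).map (fun i => (i + 1) * n)

-- ===== PRECONDITION & SPEC =====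
def Spec_produce_add_list (list_a : List Int) (out : List Int) : Prop := out = produce_add_list_alt list_a
instance (list_a : List Int) (out : List Int) : Decidable (Spec_produce_add_list list_a out) := by unfold Spec_produce_add_list; infer_instance

-- ===== CLAIM (what is proved, stated in full; the proofs are below) =====
def Claim_equal_produce_add_list : Prop := ∀ (list_a : List Int), Dom_produce_add_list list_a → Spec_produce_add_list list_a (produce_add_list list_a)

-- ===== LEMMAS AND PROOFS =====

-- ===== VERDICT (by name: the statement is the Claim_ definition above) =====
-- Loop invariant: after the first k iterations the accumulator is the closed-form prefix.
theorem produce_add_list_fold_inv (n : Int) (k : Nat) (hk : (k : Int) ≤ n) :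
    (PySem.List.pyRange 0 k 1).foldl
      (fun add_list i =>
        if i == 0 then add_list ++ [n]
        else add_list ++ [n + PySem.List.pyGetD add_list (i - 1) 0]) []
    = (PySem.List.pyRange 0 k 1).map (fun i => (i + 1) * n) := by
  induction k with
  | zero => simp
  | succ k ih =>
    have hk' : (k : Int) ≤ n := by push_cast at hk ⊢; omega
    have hsplit : PySem.List.pyRange 0 (k + 1 : Nat) 1
        = PySem.List.pyRange 0 k 1 ++ [(k : Int)] := by
      push_cast
      exact PySem.List.pyRange_one_succ_right (by positivity)
    rw [hsplit, List.foldl_append, List.map_append, ih hk']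
    simp only [List.foldl_cons, List.foldl_nil, List.map_cons, List.map_nil]
    by_cases h0 : (k : Int) = 0
    · simp [h0]
    · have hkpos : 0 < k := by omega
      have : PySem.List.pyGetD ((PySem.List.pyRange 0 (k : Int) 1).map (fun i => (i + 1) * n))
          ((k : Int) - 1) 0 = (((k : Int) - 1) + 1) * n := by
        apply PySem.List.pyGetD_map_pyRange_of_nonneg
        · omega
        · omega
      simp only [beq_iff_eq, h0, if_false, this]
      congr 2
      ring

theorem produce_add_list_spec : Claim_equal_produce_add_list := by
  intro list_a _
  unfold Spec_produce_add_list produce_add_list produce_add_list_alt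
  exact produce_add_list_fold_inv _ _ (by simp)
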